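-- pv_equiv track=rewrite | github.com/naman873/Python | seventeen/countrecur.py | count
-- ===== SOURCE A (Python) =====
-- def count(processed,unprocessed):
--     if len(unprocessed)==0:
--         if len(processed)==0:
--             return 0
--         else:
--             return 1
--
--     ch=unprocessed[0]
--     left=count(processed+ch,unprocessed[1:])
--     right=count(processed,unprocessed[1:])
--     return left+right
-- ===== SOURCE B (Python) =====
-- def count(processed, unprocessed):
--     # Closed form: each unprocessed char is either taken or not (2**n outcomes);
--     # subtract the all-empty outcome when processed is empty.
--     return 2 ** len(unprocessed) - (1 if len(processed) == 0 else 0)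
-- ===== Notes on version B (the rewrite author's own statement) =====
-- stated objective: faster
-- what changed: Replaced the exponential branching recursion by the closed form 2**len(unprocessed) minus 1 when processed is empty.
import Mathlib
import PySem

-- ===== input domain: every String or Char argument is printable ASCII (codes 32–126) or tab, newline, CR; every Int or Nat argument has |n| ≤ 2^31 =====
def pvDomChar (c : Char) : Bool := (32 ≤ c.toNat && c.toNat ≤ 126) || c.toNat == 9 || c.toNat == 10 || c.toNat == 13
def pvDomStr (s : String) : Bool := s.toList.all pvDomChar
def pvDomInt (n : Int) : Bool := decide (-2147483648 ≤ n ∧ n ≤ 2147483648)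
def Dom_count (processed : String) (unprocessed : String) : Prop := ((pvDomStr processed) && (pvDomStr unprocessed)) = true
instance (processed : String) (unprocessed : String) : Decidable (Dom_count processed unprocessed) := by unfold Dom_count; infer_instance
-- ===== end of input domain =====

-- B replaces A's exponential branching recursion by the closed form 2^len(unprocessed) - [processed empty] (measured faster, asymptotic).


-- ===== PORT A =====
-- literal transliteration of A's recursion, over the strings' char lists
def countA : List Char → List Char → Int
  | p, [] => if p.length = 0 then 0 else 1
  | p, ch :: rest => countA (p ++ [ch]) rest + countA p rest

def count (processed : String) (unprocessed : String) : Int :=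
  countA processed.toList unprocessed.toList

-- ===== PORT B =====
def count_alt (processed : String) (unprocessed : String) : Int :=
  2 ^ unprocessed.toList.length - (if processed.toList.length = 0 then 1 else 0)

-- ===== PRECONDITION & SPEC =====
def Spec_count (processed : String) (unprocessed : String) (out : Int) : Prop := out = count_alt processed unprocessed
instance (processed : String) (unprocessed : String) (out : Int) : Decidable (Spec_count processed unprocessed out) := by unfold Spec_count; infer_instance

-- ===== CLAIM (what is proved, stated in full; the proofs are below) =====
def Claim_equal_count : Prop := ∀ (processed : String) (unprocessed : String), Dom_count processed unprocessed → Spec_count processed unprocessed (count processed unprocessed)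

-- ===== LEMMAS AND PROOFS =====
theorem countA_closed (u p : List Char) :
    countA p u = 2 ^ u.length - (if p.length = 0 then 1 else 0) := by
  induction u generalizing p with
  | nil => simp [countA]; split_ifs <;> omega
  | cons ch rest ih =>
    have h1 := ih (p ++ [ch])
    have h2 := ih p
    have hne : (p ++ [ch]).length ≠ 0 := by simp
    rw [countA, h1, h2]
    simp only [if_neg hne, List.length_cons, pow_succ]
    split_ifs <;> ring

-- ===== VERDICT (by name: the statement is the Claim_ definition above) =====
theorem count_spec : Claim_equal_count := by
  intro p u _
  unfold Spec_count count count_alt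
  exact countA_closed _ _
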